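-- pv_equiv track=rewrite | github.com/ardasaritas/blind75 | arraysAndHashing/topK.py | _is_valid_topk_result
-- ===== SOURCE A (Python) =====
-- from collections import Counter, defaultdict
--
-- def _is_valid_topk_result(nums, k, result):
--     """
--     Helper method to validate topKFrequent results
--     """
--     # Check basic constraints
--     if len(result) != k:
--         return False
--
--     # Build frequency counter for validation
--     freq = Counter(nums)
--
--     # Check if all returned elements exist in original array
--     for element in result:
--         if element not in freq:
--             return False
--
--     # Check if result contains k most frequent elements
--     # Get all elements sorted by frequency (descending)
--     all_by_freq = sorted(freq.keys(), key=freq.get, reverse=True)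
--     expected_top_k = all_by_freq[:k]
--
--     # Result should contain the same elements as expected (order may vary for ties)
--     return set(result) == set(expected_top_k)
-- ===== SOURCE B (Python) =====
-- def _is_valid_topk_result(nums, k, result):
--     """
--     Validate a topKFrequent result without sorting: an element belongs to the
--     expected top k iff its rank (number of distinct elements with a strictly
--     higher count, plus earlier-seen elements with the same count) is below k.
--     Ranks come from a count histogram with prefix sums and one ordered scan.
--     """
--     if len(result) != k:
--         return False
--
--     freq = {}
--     for x in nums:
--         freq[x] = freq.get(x, 0) + 1
--
--     if not all(e in freq for e in result):
--         return False
--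
--     n = len(nums)
--     # hist[c] = number of distinct elements occurring exactly c times
--     hist = [0] * (n + 1)
--     for c in freq.values():
--         hist[c] += 1
--     # atmost[c] = number of distinct elements occurring at most c times
--     atmost = [0] * (n + 1)
--     for c in range(1, n + 1):
--         atmost[c] = atmost[c - 1] + hist[c]
--
--     m = len(freq)
--     expected = set()
--     seen = [0] * (n + 1)  # seen[c] = elements with count c scanned so far
--     for x in freq:
--         c = freq[x]
--         if (m - atmost[c]) + seen[c] < k:
--             expected.add(x)
--         seen[c] = seen[c] + 1
--
--     return set(result) == expected
-- ===== Notes on version B (the rewrite author's own statement) =====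
-- stated objective: alternative
-- what changed: The stable descending sort of the distinct elements plus [:k] slice is replaced by sort-free rank selection: a histogram of counts with suffix sums gives, for each distinct element, how many elements out-rank it (higher count, or equal count seen earlier in first-occurrence order), and the element is expected iff that rank is below k.
import Mathlib
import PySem

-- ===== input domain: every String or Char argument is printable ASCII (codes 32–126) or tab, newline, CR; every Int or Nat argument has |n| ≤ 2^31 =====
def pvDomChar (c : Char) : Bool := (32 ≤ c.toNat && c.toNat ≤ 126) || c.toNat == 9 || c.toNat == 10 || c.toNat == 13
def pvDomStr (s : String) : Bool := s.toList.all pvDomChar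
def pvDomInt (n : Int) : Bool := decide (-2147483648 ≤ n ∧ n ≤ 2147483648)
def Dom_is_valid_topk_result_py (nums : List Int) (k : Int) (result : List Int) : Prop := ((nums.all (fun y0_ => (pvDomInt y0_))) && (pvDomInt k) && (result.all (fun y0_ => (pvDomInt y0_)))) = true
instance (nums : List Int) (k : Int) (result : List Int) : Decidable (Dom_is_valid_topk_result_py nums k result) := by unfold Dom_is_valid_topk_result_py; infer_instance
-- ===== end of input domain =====

-- B replaces A's stable descending sort + [:k] slice by sort-free rank selection
-- (count histogram, prefix sums, one ordered scan); objective: alternative algorithm.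


-- ===== PORT A =====
-- literal port of _is_valid_topk_result: Counter, membership loop, full stable sort by
-- frequency (descending), take the first k, compare as sets
def is_valid_topk_result_py (nums : List Int) (k : Int) (result : List Int) : Bool :=
  if ((result.length : Int) != k) then false
  else
    let freq := PySem.Dict.counter nums
    -- 'for element in result: if element not in freq: return False'
    if result.any (fun element => ! freq.contains element) then false
    else
      let all_by_freq := PySem.List.sorted freq.keys (fun x => freq.getD x 0) true
      let expected_top_k := PySem.List.slice all_by_freq none (some k)
      PySem.Set.equal (PySem.Set.ofList result) (PySem.Set.ofList expected_top_k)

-- ===== PORT B =====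
-- literal port of Source B (each local of Source B is a named helper here):
-- 'freq = {}; for x in nums: freq[x] = freq.get(x, 0) + 1'
def pvFreq (nums : List Int) : PySem.Dict Int Int :=
  nums.foldl (fun d x => d.insert x (d.getD x 0 + 1)) PySem.Dict.empty

-- 'hist = [0]*(n+1); for c in freq.values(): hist[c] += 1'
-- (indices are counts in [1, n], so the '.toNat' list index is exact here)
def pvHist (nums : List Int) : List Int :=
  (pvFreq nums).values.foldl
    (fun h c => h.set c.toNat (PySem.List.pyGetD h c 0 + 1))
    (List.replicate (nums.length + 1) (0 : Int))

-- 'atmost = [0]*(n+1); for c in range(1, n+1): atmost[c] = atmost[c-1] + hist[c]'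
def pvAtmost (nums : List Int) : List Int :=
  (PySem.List.pyRange 1 ((nums.length : Int) + 1) 1).foldl
    (fun b c => b.set c.toNat (PySem.List.pyGetD b (c - 1) 0 + PySem.List.pyGetD (pvHist nums) c 0))
    (List.replicate (nums.length + 1) (0 : Int))

-- 'expected = set(); seen = [0]*(n+1); for x in freq: ...' (the pair is (expected, seen))
def pvScan (nums : List Int) (k : Int) : PySem.Set Int × List Int :=
  (pvFreq nums).keys.foldl
    (fun (es : PySem.Set Int × List Int) x =>
      let c := (pvFreq nums).getD x 0
      (if (((pvFreq nums).size : Int) - PySem.List.pyGetD (pvAtmost nums) c 0)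
            + PySem.List.pyGetD es.2 c 0 < k
        then PySem.Set.add es.1 x else es.1,
       es.2.set c.toNat (PySem.List.pyGetD es.2 c 0 + 1)))
    (PySem.Set.empty, List.replicate (nums.length + 1) (0 : Int))

def is_valid_topk_result_py_alt (nums : List Int) (k : Int) (result : List Int) : Bool :=
  if ((result.length : Int) != k) then false
  else if ! result.all (fun e => (pvFreq nums).contains e) then false
  else PySem.Set.equal (PySem.Set.ofList result) (pvScan nums k).1

-- ===== PRECONDITION & SPEC =====
def Spec_is_valid_topk_result_py (nums : List Int) (k : Int) (result : List Int) (out : Bool) : Prop := out = is_valid_topk_result_py_alt nums k result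
instance (nums : List Int) (k : Int) (result : List Int) (out : Bool) : Decidable (Spec_is_valid_topk_result_py nums k result out) := by unfold Spec_is_valid_topk_result_py; infer_instance

-- ===== CLAIM (what is proved, stated in full; the proofs are below) =====
def Claim_equal_is_valid_topk_result_py : Prop := ∀ (nums : List Int) (k : Int) (result : List Int), Dom_is_valid_topk_result_py nums k result → Spec_is_valid_topk_result_py nums k result (is_valid_topk_result_py nums k result)

-- ===== LEMMAS AND PROOFS =====

-- ==== A-side machinery: the stable descending sort is a bucket traversal ====
lemma insertBy_append_of_not_before {α : Type} (before : α → α → Bool) (x : α)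
    (l1 l2 : List α) (h : ∀ y ∈ l1, before x y = false) :
    PySem.List.insertBy before x (l1 ++ l2) = l1 ++ PySem.List.insertBy before x l2 := by
  induction l1 with
  | nil => simp
  | cons y ys ih =>
      simp only [List.cons_append, PySem.List.insertBy, h y (by simp)]
      simp only [Bool.false_eq_true, if_false, List.cons.injEq, true_and]
      exact ih (fun z hz => h z (by simp [hz]))

lemma insertBy_eq_cons_of_before {α : Type} (before : α → α → Bool) (x : α)
    (l : List α) (h : ∀ y ∈ l, before x y = true) :
    PySem.List.insertBy before x l = x :: l := by
  cases l with
  | nil => rfl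
  | cons y ys => simp [PySem.List.insertBy, h y (by simp)]

lemma sorted_rev_eq_bucket_flatMap (f : Int → Int) (n : Int) (ks : List Int)
    (h : ∀ x ∈ ks, 1 ≤ f x ∧ f x ≤ n) :
    PySem.List.sorted ks f true
      = (PySem.List.pyRange n 0 (-1)).flatMap (fun c => ks.filter (fun x => f x == c)) := by
  rw [PySem.List.sorted_rev_eq_foldl_insertBy]
  induction ks using List.reverseRecOn with
  | nil => simp
  | append_singleton ks x ih =>
      have hx : 1 ≤ f x ∧ f x ≤ n := h x (by simp)
      rw [List.foldl_append, List.foldl_cons, List.foldl_nil,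
        ih (fun y hy => h y (by simp [hy]))]
      have hsplit : PySem.List.pyRange n 0 (-1)
          = (PySem.List.pyRange (f x + 1) (n + 1)).reverse ++ [f x]
            ++ (PySem.List.pyRange 1 (f x)).reverse := by
        rw [PySem.List.pyRange_neg_one_eq_reverse]
        norm_num
        rw [PySem.List.pyRange_one_append 1 (f x) (n + 1) (by omega) (by omega),
          PySem.List.pyRange_one_append (f x) (f x + 1) (n + 1) (by omega) (by omega),
          PySem.List.pyRange_one_singleton]
        simp
      rw [hsplit]
      simp only [List.flatMap_append, List.flatMap_cons, List.flatMap_nil, List.append_nil]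
      have hfilter : ∀ c : Int, (ks ++ [x]).filter (fun y => f y == c)
          = ks.filter (fun y => f y == c) ++ (if f x == c then [x] else []) := by
        intro c
        rw [List.filter_append]
        by_cases hc : f x == c <;> simp [List.filter, hc]
      have hhi : ∀ c ∈ (PySem.List.pyRange (f x + 1) (n + 1)).reverse,
          (ks ++ [x]).filter (fun y => f y == c) = ks.filter (fun y => f y == c) := by
        intro c hc
        rw [List.mem_reverse, PySem.List.mem_pyRange_one] at hc
        rw [hfilter c, if_neg (by simp; omega), List.append_nil]
      have hlo : ∀ c ∈ (PySem.List.pyRange 1 (f x)).reverse,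
          (ks ++ [x]).filter (fun y => f y == c) = ks.filter (fun y => f y == c) := by
        intro c hc
        rw [List.mem_reverse, PySem.List.mem_pyRange_one] at hc
        rw [hfilter c, if_neg (by simp; omega), List.append_nil]
      rw [List.flatMap_congr hhi, List.flatMap_congr hlo, hfilter (f x), if_pos (by simp)]
      rw [List.append_assoc, insertBy_append_of_not_before _ x _ _ ?_,
        insertBy_append_of_not_before _ x _ _ ?_,
        insertBy_eq_cons_of_before _ x _ ?_]
      · simp
      · intro y hy
        rw [List.mem_flatMap] at hy
        obtain ⟨c, hc, hyc⟩ := hy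
        rw [List.mem_reverse, PySem.List.mem_pyRange_one] at hc
        have := List.of_mem_filter hyc
        simp only [beq_iff_eq] at this
        simp only [decide_eq_true_eq]; omega
      · intro y hy
        have := List.of_mem_filter hy
        simp only [beq_iff_eq] at this
        simp only [decide_eq_false_iff_not]; omega
      · intro y hy
        rw [List.mem_flatMap] at hy
        obtain ⟨c, hc, hyc⟩ := hy
        rw [List.mem_reverse, PySem.List.mem_pyRange_one] at hc
        have := List.of_mem_filter hyc
        simp only [beq_iff_eq] at this
        simp only [decide_eq_false_iff_not]; omega

-- ==== new lemmas ====

-- position of x inside a filtered block = how many block members precede x in the base list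
lemma idxOf_filter_countP (ks : List Int) (p : Int → Bool) (x : Int)
    (hx : x ∈ ks) (hpx : p x = true) :
    (ks.filter p).idxOf x = (ks.take (ks.idxOf x)).countP p := by
  induction ks with
  | nil => cases hx
  | cons y ys ih =>
      by_cases hyx : y = x
      · subst hyx
        simp [hpx, List.idxOf_cons_self]
      · have hmem : x ∈ ys := by
          rcases List.mem_cons.mp hx with h | h
          · exact absurd h.symm hyx
          · exact h
        have hidx : (y :: ys).idxOf x = ys.idxOf x + 1 := by
          simp [hyx]
        rw [hidx, List.take_succ_cons, List.countP_cons]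
        by_cases hpy : p y = true
        · rw [List.filter_cons_of_pos hpy]
          have h2 : (y :: ys.filter p).idxOf x = (ys.filter p).idxOf x + 1 := by
            simp [hyx]
          rw [h2, ih hmem]
          simp [hpy]
        · rw [List.filter_cons_of_neg (by simpa using hpy), ih hmem]
          simp [hpy]

-- sum over a range of per-count block sizes = count of elements whose key lies in the range
lemma sum_blocks (f : Int → Int) (a b : Int) (ks : List Int) :
    ((PySem.List.pyRange a b 1).map (fun c' => ks.countP (fun y => f y == c'))).sum
      = ks.countP (fun y => decide (a ≤ f y ∧ f y < b)) := by
  induction ks with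
  | nil => simp
  | cons y ys ih =>
      simp only [List.countP_cons]
      rw [List.sum_map_add, ih, PySem.List.sum_map_ite_one_zero_nat]
      have hcount : (PySem.List.pyRange a b 1).countP (fun c' => f y == c')
          = if a ≤ f y ∧ f y < b then 1 else 0 := by
        have : (PySem.List.pyRange a b 1).countP (fun c' => f y == c')
            = (PySem.List.pyRange a b 1).count (f y) := by
          rw [List.count]; apply List.countP_congr; intro c' _
          constructor <;> intro h <;> simp_all [beq_iff_eq]
        rw [this]
        by_cases hin : a ≤ f y ∧ f y < b
        · rw [if_pos hin]
          exact List.count_eq_one_of_mem (PySem.List.nodup_pyRange_one a b)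
            (PySem.List.mem_pyRange_one.mpr hin)
        · rw [if_neg hin]
          refine List.count_eq_zero.mpr (fun hmem => hin (PySem.List.mem_pyRange_one.mp hmem))
      rw [hcount]
      by_cases hy : a ≤ f y ∧ f y < b <;> simp [hy]

-- membership in take m ↔ first index below m
-- (List.mem_take_iff_idxOf_lt from Mathlib, cited in proofs)

-- index of x in the stable descending-by-count order of the distinct elements
lemma idxOf_sorted_counts (nums : List Int) (x : Int)
    (hx : x ∈ PySem.Set.ofList nums) :
    (PySem.List.sorted (PySem.Set.ofList nums) (fun y => ((nums.count y : Int))) true).idxOf x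
      = (PySem.Set.ofList nums).countP (fun y => decide (nums.count x < nums.count y))
        + ((PySem.Set.ofList nums).take ((PySem.Set.ofList nums).idxOf x)).countP
            (fun y => (nums.count y : Int) == (nums.count x : Int)) := by
  set ks := PySem.Set.ofList nums with hks
  set f : Int → Int := fun y => ((nums.count y : Int)) with hf
  set n : Int := (nums.length : Int) with hn
  set c : Int := f x with hc
  have hxnums : x ∈ nums := (PySem.Set.mem_ofList nums x).mp hx
  have hbounds : ∀ y ∈ ks, 1 ≤ f y ∧ f y ≤ n := by
    intro y hy
    have hy' : y ∈ nums := (PySem.Set.mem_ofList nums y).mp hy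
    have h1 : 1 ≤ nums.count y := List.count_pos_iff.mpr hy'
    have h2 : nums.count y ≤ nums.length := List.count_le_length
    exact ⟨by simp only [hf]; exact_mod_cast h1, by simp only [hf, hn]; exact_mod_cast h2⟩
  have hcb : 1 ≤ c ∧ c ≤ n := hbounds x hx
  rw [sorted_rev_eq_bucket_flatMap f n ks hbounds]
  have hsplit : PySem.List.pyRange n 0 (-1)
      = (PySem.List.pyRange (c + 1) (n + 1)).reverse ++ [c]
        ++ (PySem.List.pyRange 1 c).reverse := by
    rw [PySem.List.pyRange_neg_one_eq_reverse]
    norm_num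
    rw [PySem.List.pyRange_one_append 1 c (n + 1) (by omega) (by omega),
      PySem.List.pyRange_one_append c (c + 1) (n + 1) (by omega) (by omega),
      PySem.List.pyRange_one_singleton]
    simp
  rw [hsplit]
  simp only [List.flatMap_append, List.flatMap_cons, List.flatMap_nil, List.append_nil,
    List.append_assoc]
  have hnotHi : x ∉ ((PySem.List.pyRange (c + 1) (n + 1)).reverse.flatMap
      (fun c' => ks.filter (fun y => f y == c'))) := by
    intro hmem
    rw [List.mem_flatMap] at hmem
    obtain ⟨c', hc', hyc⟩ := hmem
    rw [List.mem_reverse, PySem.List.mem_pyRange_one] at hc'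
    have := List.of_mem_filter hyc
    simp only [beq_iff_eq] at this
    omega
  rw [List.idxOf_append_of_notMem hnotHi,
    List.idxOf_append_of_mem (List.mem_filter.mpr ⟨hx, by simp [hc]⟩)]
  congr 1
  · -- length of the high blocks = number of strictly more frequent distinct elements
    rw [List.length_flatMap]
    rw [List.map_reverse, List.sum_reverse]
    have : (PySem.List.pyRange (c + 1) (n + 1)).map
        (fun c' => (ks.filter (fun y => f y == c')).length)
        = (PySem.List.pyRange (c + 1) (n + 1)).map (fun c' => ks.countP (fun y => f y == c')) := by
      apply List.map_congr_left; intro c' _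
      rw [List.countP_eq_length_filter]
    rw [this, sum_blocks]
    apply List.countP_congr; intro y hy
    have := hbounds y hy
    constructor <;> intro h <;> simp only [decide_eq_true_eq] at * <;>
      [skip; constructor] <;> simp only [hf, hc] at * <;> omega
  · -- position inside the block of equally frequent elements
    rw [idxOf_filter_countP ks _ x hx (by simp [hc])]

-- the histogram-building fold, read back at a valid index c
lemma foldl_incr_get (cs : List Int) (h0 : List Int) (c : Int)
    (hcs : ∀ c' ∈ cs, 0 ≤ c' ∧ c'.toNat < h0.length) (hc : 0 ≤ c) (hlt : c.toNat < h0.length) :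
    PySem.List.pyGetD
      (cs.foldl (fun h c' => h.set c'.toNat (PySem.List.pyGetD h c' 0 + 1)) h0) c 0
      = PySem.List.pyGetD h0 c 0 + (cs.count c : Int) := by
  induction cs generalizing h0 with
  | nil => simp
  | cons p ps ih =>
      have hp := hcs p (by simp)
      rw [List.foldl_cons]
      rw [ih _ (by intro q hq; simpa [List.length_set] using hcs q (by simp [hq]))
        (by simpa [List.length_set] using hlt)]
      rw [PySem.List.pyGetD_of_nonneg _ _ hc, PySem.List.pyGetD_of_nonneg _ _ hc,
        PySem.List.pyGetD_of_nonneg _ _ hp.1]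
      by_cases hpc : p = c
      · subst hpc
        have : (h0.set p.toNat (h0.getD p.toNat 0 + 1)).getD p.toNat 0
            = h0.getD p.toNat 0 + 1 := by
          simp [List.getD, hp.2]
        rw [this]
        simp [List.count_cons_self]
        omega
      · have hne : p.toNat ≠ c.toNat := by omega
        have : (h0.set p.toNat (h0.getD p.toNat 0 + 1)).getD c.toNat 0
            = h0.getD c.toNat 0 := by
          simp [List.getD, List.getElem?_set_ne hne]
        rw [this, List.count_cons_of_ne (by omega)]

-- the prefix-sum fold: cell c of 'atmost' holds the sum of hist[1..c] once c has been processed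
lemma atmost_fold (hist : List Int) (n : Nat) (u : Nat) (hu : u ≤ n) :
    ((PySem.List.pyRange 1 ((u : Int) + 1) 1).foldl
        (fun b c => b.set c.toNat (PySem.List.pyGetD b (c - 1) 0 + PySem.List.pyGetD hist c 0))
        (List.replicate (n + 1) (0 : Int))).length = n + 1
    ∧ ∀ c : Nat, c ≤ n →
      PySem.List.pyGetD
        ((PySem.List.pyRange 1 ((u : Int) + 1) 1).foldl
          (fun b c => b.set c.toNat (PySem.List.pyGetD b (c - 1) 0 + PySem.List.pyGetD hist c 0))
          (List.replicate (n + 1) (0 : Int))) (c : Int) 0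
        = if c ≤ u
          then ((PySem.List.pyRange 1 ((c : Int) + 1) 1).map
            (fun c' => PySem.List.pyGetD hist c' 0)).sum
          else 0 := by
  induction u with
  | zero =>
      rw [PySem.List.pyRange_one_eq_nil (by norm_num)]
      refine ⟨by simp, ?_⟩
      intro c hc
      rw [List.foldl_nil, PySem.List.pyGetD_natCast, List.getD_replicate _ (by omega)]
      by_cases h0 : c ≤ 0
      · rw [if_pos h0]
        have hc0 : c = 0 := by omega
        subst hc0
        rw [show ((0 : Nat) : Int) + 1 = 1 by norm_num,
          PySem.List.pyRange_one_eq_nil (by norm_num)]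
        simp
      · rw [if_neg h0]
  | succ u ih =>
      have ih := ih (by omega)
      have hrange : PySem.List.pyRange 1 ((u : Int) + 1 + 1) 1
          = PySem.List.pyRange 1 ((u : Int) + 1) 1 ++ [(u : Int) + 1] := by
        exact PySem.List.pyRange_one_succ_right (by omega)
      have hcast : ((u + 1 : Nat) : Int) + 1 = (u : Int) + 1 + 1 := by push_cast; ring
      rw [hcast, hrange, List.foldl_append, List.foldl_cons, List.foldl_nil]
      set F := (PySem.List.pyRange 1 ((u : Int) + 1) 1).foldl
          (fun b c => b.set c.toNat (PySem.List.pyGetD b (c - 1) 0 + PySem.List.pyGetD hist c 0))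
          (List.replicate (n + 1) (0 : Int)) with hF
      have hlen : F.length = n + 1 := ih.1
      have htn : ((u : Int) + 1).toNat = u + 1 := by omega
      rw [htn]
      constructor
      · simpa [List.length_set] using hlen
      · intro c hc
        rw [PySem.List.pyGetD_natCast]
        by_cases hcu : c = u + 1
        · subst hcu
          rw [List.getD, List.getElem?_set_self (by omega), Option.getD_some,
            if_pos (le_refl (u + 1))]
          have hm1 : (u : Int) + 1 - 1 = ((u : Nat) : Int) := by ring
          rw [hm1, ih.2 u (by omega), if_pos (le_refl u)]
          rw [hcast, hrange, List.map_append, List.sum_append]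
          simp
        · rw [List.getD, List.getElem?_set_ne (by omega), ← List.getD,
            ← PySem.List.pyGetD_natCast, ih.2 c hc]
          by_cases h1 : c ≤ u
          · rw [if_pos h1, if_pos (by omega)]
          · rw [if_neg h1, if_neg (by omega)]

-- the selection scan: 'seen' counts per-count occurrences of the processed prefix, and the
-- selected set holds exactly the elements whose score (B0 of their count plus the number of
-- equal-count elements before them) is below k
lemma scan_fold (f B0 : Int → Int) (k : Int) (n : Nat) (l : List Int)
    (hnd : l.Nodup) (hb : ∀ x ∈ l, 0 ≤ f x ∧ (f x).toNat < n + 1) :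
    ((l.foldl
        (fun (es : PySem.Set Int × List Int) x =>
          (if B0 (f x) + PySem.List.pyGetD es.2 (f x) 0 < k then PySem.Set.add es.1 x else es.1,
           es.2.set (f x).toNat (PySem.List.pyGetD es.2 (f x) 0 + 1)))
        (PySem.Set.empty, List.replicate (n + 1) (0 : Int))).2.length = n + 1)
    ∧ (∀ c : Int, 0 ≤ c →
        PySem.List.pyGetD
          ((l.foldl
            (fun (es : PySem.Set Int × List Int) x =>
              (if B0 (f x) + PySem.List.pyGetD es.2 (f x) 0 < k then PySem.Set.add es.1 x else es.1,
               es.2.set (f x).toNat (PySem.List.pyGetD es.2 (f x) 0 + 1)))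
            (PySem.Set.empty, List.replicate (n + 1) (0 : Int))).2) c 0
          = (l.countP (fun z => f z == c) : Int))
    ∧ (∀ y, y ∈ (l.foldl
          (fun (es : PySem.Set Int × List Int) x =>
            (if B0 (f x) + PySem.List.pyGetD es.2 (f x) 0 < k then PySem.Set.add es.1 x else es.1,
             es.2.set (f x).toNat (PySem.List.pyGetD es.2 (f x) 0 + 1)))
          (PySem.Set.empty, List.replicate (n + 1) (0 : Int))).1
        ↔ y ∈ l ∧ B0 (f y) + ((l.take (l.idxOf y)).countP (fun z => f z == f y) : Int) < k) := by
  induction l using List.reverseRecOn with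
  | nil =>
      refine ⟨by simp, ?_, by simp [PySem.Set.empty]⟩
      intro c hc
      rw [List.foldl_nil, PySem.List.pyGetD_of_nonneg _ _ hc]
      simp [List.getD]
  | append_singleton l x ih =>
      have hnd' : l.Nodup := (List.nodup_append.mp hnd).1
      have hxl : x ∉ l := by
        have h := List.nodup_append.mp hnd
        intro hx
        exact h.2.2 x hx x (List.mem_singleton_self x) rfl
      have hb' : ∀ z ∈ l, 0 ≤ f z ∧ (f z).toNat < n + 1 := fun z hz => hb z (by simp [hz])
      have hbx := hb x (by simp)
      obtain ⟨ih1, ih2, ih3⟩ := ih hnd' hb'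
      rw [List.foldl_append, List.foldl_cons, List.foldl_nil]
      set st := l.foldl
          (fun (es : PySem.Set Int × List Int) x =>
            (if B0 (f x) + PySem.List.pyGetD es.2 (f x) 0 < k then PySem.Set.add es.1 x else es.1,
             es.2.set (f x).toNat (PySem.List.pyGetD es.2 (f x) 0 + 1)))
          (PySem.Set.empty, List.replicate (n + 1) (0 : Int)) with hst
      have hseenx : PySem.List.pyGetD st.2 (f x) 0 = (l.countP (fun z => f z == f x) : Int) :=
        ih2 (f x) hbx.1
      refine ⟨?_, ?_, ?_⟩
      · simpa [List.length_set] using ih1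
      · intro c hc
        rw [PySem.List.pyGetD_of_nonneg _ _ hc]
        have hlen2 : st.2.length = n + 1 := ih1
        by_cases hcx : c = f x
        · subst hcx
          rw [List.getD, List.getElem?_set_self (by omega), Option.getD_some, List.countP_append,
            hseenx]
          simp
        · have hne : (f x).toNat ≠ c.toNat := by omega
          rw [List.getD, List.getElem?_set_ne hne, ← List.getD,
            ← PySem.List.pyGetD_of_nonneg _ _ hc, ih2 c hc, List.countP_append]
          have hfxc : [x].countP (fun z => f z == c) = 0 := by
            simp only [List.countP_cons, List.countP_nil]
            have : (f x == c) = false := by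
              apply beq_eq_false_iff_ne.mpr
              intro h; exact hcx (by omega)
            simp [this]
          rw [hfxc]
          simp
      · intro y
        have hmem : y ∈ (if B0 (f x) + PySem.List.pyGetD st.2 (f x) 0 < k
              then PySem.Set.add st.1 x else st.1)
            ↔ y ∈ st.1 ∨ (B0 (f x) + PySem.List.pyGetD st.2 (f x) 0 < k ∧ y = x) := by
          by_cases hcond : B0 (f x) + PySem.List.pyGetD st.2 (f x) 0 < k
          · rw [if_pos hcond, PySem.Set.mem_add]
            tauto
          · rw [if_neg hcond]
            tauto
        rw [hmem, ih3 y]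
        by_cases hyx : y = x
        · subst hyx
          have hyl : y ∉ l := hxl
          have hidx : (l ++ [y]).idxOf y = l.length := by
            rw [List.idxOf_append_of_notMem hyl]
            simp
          rw [hidx, List.take_left]
          rw [hseenx]
          constructor
          · rintro (⟨hy, _⟩ | ⟨hcond, _⟩)
            · exact absurd hy hyl
            · exact ⟨by simp, hcond⟩
          · rintro ⟨_, hcond⟩
            exact Or.inr ⟨hcond, rfl⟩
        · have hidx : y ∈ l → (l ++ [x]).idxOf y = l.idxOf y :=
            fun hy => List.idxOf_append_of_mem hy
          constructor
          · rintro (⟨hy, hcond⟩ | ⟨_, hyx'⟩)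
            · refine ⟨by simp [hy], ?_⟩
              rw [hidx hy, List.take_append_of_le_length (le_of_lt (List.idxOf_lt_length_of_mem hy))]
              exact hcond
            · exact absurd hyx' hyx
          · rintro ⟨hy, hcond⟩
            have hyl : y ∈ l := by
              rcases List.mem_append.mp hy with h | h
              · exact h
              · simp at h; exact absurd h hyx
            refine Or.inl ⟨hyl, ?_⟩
            rw [hidx hyl, List.take_append_of_le_length
              (le_of_lt (List.idxOf_lt_length_of_mem hyl))] at hcond
            exact hcond


-- ==== bridging the two ports ====

lemma pvFreq_eq (nums : List Int) : pvFreq nums = PySem.Dict.counter nums :=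
  PySem.Dict.foldl_insert_getD_add_one_eq_counter nums

lemma size_counter (nums : List Int) :
    (PySem.Dict.counter nums).size = (PySem.Set.ofList nums).length := by
  simp [PySem.Dict.size, PySem.Dict.items_counter]

lemma values_counter (nums : List Int) :
    (PySem.Dict.counter nums).values
      = (PySem.Set.ofList nums).map (fun y => ((nums.count y : Int))) := by
  simp [PySem.Dict.values, PySem.Dict.items_counter, List.map_map]

lemma sum_map_cast (l : List Int) (g : Int → Nat) :
    (l.map (fun x => ((g x : Nat) : Int))).sum = (((l.map g).sum : Nat) : Int) := by
  induction l with
  | nil => simp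
  | cons a t ih => simp [ih]

lemma any_not_eq_not_all (l : List Int) (p : Int → Bool) :
    l.any (fun e => !p e) = !l.all p := by
  induction l with
  | nil => simp
  | cons a t ih => simp [List.any_cons, List.all_cons, ih, Bool.not_and]

lemma equal_congr (s : PySem.Set Int) (t u : List Int) (h : ∀ x, x ∈ t ↔ x ∈ u) :
    PySem.Set.equal s t = PySem.Set.equal s u := by
  apply Bool.eq_iff_iff.mpr
  rw [PySem.Set.equal_iff, PySem.Set.equal_iff]
  constructor <;> intro hh x <;> rw [hh x] <;> simp [h x]

lemma pvHist_get (nums : List Int) (c : Int) (h1 : 1 ≤ c) (hn : c ≤ (nums.length : Int)) :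
    PySem.List.pyGetD (pvHist nums) c 0
      = (((PySem.Set.ofList nums).countP (fun y => ((nums.count y : Int)) == c) : Nat) : Int) := by
  unfold pvHist
  rw [pvFreq_eq, values_counter]
  rw [foldl_incr_get _ _ c ?bounds (by omega) ?clen]
  case bounds =>
    intro c' hc'
    rw [List.mem_map] at hc'
    obtain ⟨y, hy, rfl⟩ := hc'
    have hy' : y ∈ nums := (PySem.Set.mem_ofList nums y).mp hy
    have hp : 1 ≤ nums.count y := List.count_pos_iff.mpr hy'
    have hl : nums.count y ≤ nums.length := List.count_le_length
    constructor
    · positivity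
    · simp only [Int.toNat_natCast, List.length_replicate]; omega
  case clen => simp only [List.length_replicate]; omega
  · rw [PySem.List.pyGetD_of_nonneg _ _ (by omega), List.getD_replicate _ (by omega)]
    rw [List.count, List.countP_map]
    simp only [zero_add, Function.comp_def]

lemma pvAtmost_get (nums : List Int) (c : Nat) (hc : c ≤ nums.length) :
    PySem.List.pyGetD (pvAtmost nums) (c : Int) 0
      = (((PySem.Set.ofList nums).countP (fun y => decide (nums.count y ≤ c)) : Nat) : Int) := by
  unfold pvAtmost
  rw [(atmost_fold (pvHist nums) nums.length nums.length (le_refl _)).2 c hc, if_pos hc]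
  have hmap : (PySem.List.pyRange 1 ((c : Int) + 1) 1).map
        (fun c' => PySem.List.pyGetD (pvHist nums) c' 0)
      = (PySem.List.pyRange 1 ((c : Int) + 1) 1).map
        (fun c' => (((PySem.Set.ofList nums).countP
          (fun y => ((nums.count y : Int)) == c') : Nat) : Int)) := by
    apply List.map_congr_left; intro c' hc'
    rw [PySem.List.mem_pyRange_one] at hc'
    exact pvHist_get nums c' hc'.1 (by omega)
  rw [hmap, sum_map_cast, sum_blocks (fun y => ((nums.count y : Int))) 1 ((c : Int) + 1)]
  congr 1
  apply List.countP_congr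
  intro y hy
  have hy' : y ∈ nums := (PySem.Set.mem_ofList nums y).mp hy
  have hp : 1 ≤ nums.count y := List.count_pos_iff.mpr hy'
  constructor <;> intro h <;> simp only [decide_eq_true_eq] at * <;> [omega; exact ⟨by omega, by omega⟩]

lemma pvScan_mem (nums : List Int) (k x : Int) :
    x ∈ (pvScan nums k).1
      ↔ x ∈ PySem.Set.ofList nums ∧
        ((((PySem.Set.ofList nums).countP (fun y => decide (nums.count x < nums.count y)) : Nat) : Int)
          + ((((PySem.Set.ofList nums).take ((PySem.Set.ofList nums).idxOf x)).countP
              (fun y => ((nums.count y : Int)) == ((nums.count x : Int))) : Nat) : Int)) < k := by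
  have hks : (pvFreq nums).keys = PySem.Set.ofList nums := by
    rw [pvFreq_eq, PySem.Dict.keys_counter]
  have hnd : (pvFreq nums).keys.Nodup := by rw [hks]; exact PySem.Set.nodup_ofList nums
  have hgetD : ∀ z : Int, (pvFreq nums).getD z 0 = ((nums.count z : Int)) := by
    intro z; rw [pvFreq_eq, PySem.Dict.getD_counter]
  have hb : ∀ z ∈ (pvFreq nums).keys,
      0 ≤ (fun y => (pvFreq nums).getD y 0) z
      ∧ ((fun y => (pvFreq nums).getD y 0) z).toNat < nums.length + 1 := by
    intro z hz
    have hz' : z ∈ nums := (PySem.Set.mem_ofList nums z).mp (hks ▸ hz)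
    have hl : nums.count z ≤ nums.length := List.count_le_length
    simp only [hgetD]
    constructor
    · positivity
    · simp only [Int.toNat_natCast]; omega
  have h := (scan_fold (fun y => (pvFreq nums).getD y 0)
      (fun c => (((pvFreq nums).size : Int) - PySem.List.pyGetD (pvAtmost nums) c 0)) k
      nums.length (pvFreq nums).keys hnd hb).2.2 x
  refine Iff.trans (show x ∈ (pvScan nums k).1 ↔ _ from h) ?_
  simp only [hgetD, hks]
  constructor
  · rintro ⟨hx, hlt⟩
    refine ⟨hx, ?_⟩
    have hx' : x ∈ nums := (PySem.Set.mem_ofList nums x).mp hx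
    have hc1 : 1 ≤ nums.count x := List.count_pos_iff.mpr hx'
    have hcn : nums.count x ≤ nums.length := List.count_le_length
    rw [pvFreq_eq, size_counter, pvAtmost_get nums (nums.count x) hcn] at hlt
    have hpart : (PySem.Set.ofList nums).countP (fun y => decide (nums.count y ≤ nums.count x))
        + (PySem.Set.ofList nums).countP (fun y => decide (nums.count x < nums.count y))
        = (PySem.Set.ofList nums).length := by
      rw [List.length_eq_countP_add_countP (fun y => decide (nums.count y ≤ nums.count x))]
      congr 1
      apply List.countP_congr
      intro y _
      simp only [decide_eq_true_eq]
      constructor <;> intro <;> omega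
    omega
  · rintro ⟨hx, hlt⟩
    refine ⟨hx, ?_⟩
    have hx' : x ∈ nums := (PySem.Set.mem_ofList nums x).mp hx
    have hc1 : 1 ≤ nums.count x := List.count_pos_iff.mpr hx'
    have hcn : nums.count x ≤ nums.length := List.count_le_length
    rw [pvFreq_eq, size_counter, pvAtmost_get nums (nums.count x) hcn]
    have hpart : (PySem.Set.ofList nums).countP (fun y => decide (nums.count y ≤ nums.count x))
        + (PySem.Set.ofList nums).countP (fun y => decide (nums.count x < nums.count y))
        = (PySem.Set.ofList nums).length := by
      rw [List.length_eq_countP_add_countP (fun y => decide (nums.count y ≤ nums.count x))]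
      congr 1
      apply List.countP_congr
      intro y _
      simp only [decide_eq_true_eq]
      constructor <;> intro <;> omega
    omega

lemma a_mem (nums : List Int) (x : Int) (m : Nat) :
    x ∈ (PySem.List.sorted (PySem.Set.ofList nums) (fun y => ((nums.count y : Int))) true).take m
      ↔ x ∈ PySem.Set.ofList nums ∧
        (PySem.Set.ofList nums).countP (fun y => decide (nums.count x < nums.count y))
          + ((PySem.Set.ofList nums).take ((PySem.Set.ofList nums).idxOf x)).countP
              (fun y => ((nums.count y : Int)) == ((nums.count x : Int))) < m := by
  constructor
  · intro h
    have hL := List.mem_of_mem_take h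
    have hks := (PySem.List.mem_sorted _ _ _ _).mp hL
    refine ⟨hks, ?_⟩
    rw [← idxOf_sorted_counts nums x hks]
    exact (List.mem_take_iff_idxOf_lt hL).mp h
  · rintro ⟨hks, hlt⟩
    have hL := (PySem.List.mem_sorted (PySem.Set.ofList nums)
      (fun y => ((nums.count y : Int))) true x).mpr hks
    refine (List.mem_take_iff_idxOf_lt hL).mpr ?_
    rw [idxOf_sorted_counts nums x hks]
    exact hlt

-- ===== VERDICT (by name: the statement is the Claim_ definition above) =====
theorem is_valid_topk_result_py_spec : Claim_equal_is_valid_topk_result_py := by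
  intro nums k result _
  unfold Spec_is_valid_topk_result_py is_valid_topk_result_py is_valid_topk_result_py_alt
  by_cases hlen : ((result.length : Int) != k) = true
  · simp [hlen]
  · simp only [hlen, Bool.false_eq_true, if_false]
    have hk : (result.length : Int) = k := by simpa using hlen
    simp only [pvFreq_eq]
    rw [any_not_eq_not_all]
    by_cases hmem : (! result.all (fun e => (PySem.Dict.counter nums).contains e)) = true
    · simp [hmem]
    · simp only [hmem, Bool.false_eq_true, if_false]
      simp only [PySem.Dict.keys_counter, PySem.Dict.getD_counter]
      apply equal_congr
      intro x
      rw [PySem.Set.mem_ofList, ← hk, PySem.List.slice_to_natCast, a_mem, pvScan_mem]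
      constructor
      · rintro ⟨hx, hlt⟩
        exact ⟨hx, by omega⟩
      · rintro ⟨hx, hlt⟩
        exact ⟨hx, by omega⟩
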